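-- pv_equiv track=rewrite | github.com/code4tomorrow/python | 3_advanced/chapter17/solutions/tuple_bear.py | tuple_bear
-- ===== SOURCE A (Python) =====
-- def tuple_bear(item: list):
--     ourmin = [item[0][0], item[0][1]]
--     for i in range(len(item)):
--         if ourmin[0] > item[i][0]:
--             ourmin[0] = item[i][0]
--             ourmin[1] = item[i][1]
--             i = 0
--     return ourmin[1]
-- ===== SOURCE B (Python) =====
-- def tuple_bear(item: list):
--     return sorted(item, key=lambda t: t[0])[0][1]
-- ===== Notes on version B (the rewrite author's own statement) =====
-- stated objective: idiomatic
-- what changed: Replaces the manual min-tracking loop with a stable sort by first component followed by indexing the first element's second component.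
import Mathlib
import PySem

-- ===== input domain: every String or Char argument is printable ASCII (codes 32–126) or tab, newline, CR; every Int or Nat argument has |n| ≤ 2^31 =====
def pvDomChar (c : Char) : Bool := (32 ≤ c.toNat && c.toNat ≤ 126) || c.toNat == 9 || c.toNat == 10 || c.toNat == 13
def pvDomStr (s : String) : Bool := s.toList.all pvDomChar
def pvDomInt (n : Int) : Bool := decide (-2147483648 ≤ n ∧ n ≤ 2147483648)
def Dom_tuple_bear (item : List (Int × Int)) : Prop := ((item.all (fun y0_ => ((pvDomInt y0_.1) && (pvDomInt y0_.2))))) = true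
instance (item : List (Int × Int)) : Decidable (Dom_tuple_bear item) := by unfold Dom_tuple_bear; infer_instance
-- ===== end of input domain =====

-- B replaces A's manual running-minimum loop with a stable sort by first component
-- followed by taking the first element (idiomatic, not faster). Equivalence proved on
-- nonempty lists; on [] the Python A raises IndexError (excluded by Pre_).

-- ===== PORT A =====
-- literal port: ourmin = item[0]; loop over all indices, update when ourmin[0] > item[i][0]
def tuple_bear (item : List (Int × Int)) : Int :=
  match item with
  | [] => 0  -- Python raises IndexError here; excluded by Pre_tuple_bear
  | x :: _ =>
    (item.foldl (fun m p => if m.1 > p.1 then p else m) (x.1, x.2)).2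

-- ===== PORT B =====
-- literal port of Source B: sorted(item, key=lambda t: t[0])[0][1]
def tuple_bear_alt (item : List (Int × Int)) : Int :=
  match PySem.List.sorted item (fun t => t.1) false with
  | [] => 0  -- sorted([])[0] raises IndexError in Python; excluded by Pre_tuple_bear
  | m :: _ => m.2

-- ===== PRECONDITION & SPEC =====
-- Pre_ excludes exactly the empty list, where both Pythons raise IndexError.
def Pre_tuple_bear (item : List (Int × Int)) : Prop := item ≠ []
instance (item : List (Int × Int)) : Decidable (Pre_tuple_bear item) := by
  unfold Pre_tuple_bear; infer_instance
def pvWitness_tuple_bear : (List (Int × Int)) := [(1, 2)]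

def Spec_tuple_bear (item : List (Int × Int)) (out : Int) : Prop := out = tuple_bear_alt item
instance (item : List (Int × Int)) (out : Int) : Decidable (Spec_tuple_bear item out) := by unfold Spec_tuple_bear; infer_instance

-- ===== CLAIM (what is proved, stated in full; the proofs are below) =====
def Claim_equal_tuple_bear : Prop := ∀ (item : List (Int × Int)), Dom_tuple_bear item → Pre_tuple_bear item → Spec_tuple_bear item (tuple_bear item)

-- ===== LEMMAS AND PROOFS =====

-- head of a stable insert: the new element goes in front iff its key is strictly smaller
theorem head?_insertBy (x h : Int × Int) (t : List (Int × Int)) :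
    (PySem.List.insertBy (fun a b => decide ((a : Int × Int).1 < b.1)) x (h :: t)).head?
      = some (if x.1 < h.1 then x else h) := by
  simp only [PySem.List.insertBy]
  by_cases hc : x.1 < h.1 <;> simp [hc]

-- nonemptiness of insertBy into a nonempty list
theorem insertBy_ne_nil (bf : (Int × Int) → (Int × Int) → Bool) (x : Int × Int)
    (l : List (Int × Int)) : PySem.List.insertBy bf x l ≠ [] := by
  cases l with
  | nil => simp [PySem.List.insertBy]
  | cons h t => simp only [PySem.List.insertBy]; split <;> simp

-- invariant: the head of the insert-fold is A's running minimum
theorem head?_foldl_insertBy (xs : List (Int × Int)) :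
    ∀ (h : Int × Int) (t : List (Int × Int)),
    (xs.foldl (fun acc x =>
        PySem.List.insertBy (fun a b => decide ((a : Int × Int).1 < b.1)) x acc) (h :: t)).head?
      = some (xs.foldl (fun m p => if m.1 > p.1 then p else m) h) := by
  induction xs with
  | nil => intro h t; simp
  | cons x xs ih =>
    intro h t
    simp only [List.foldl_cons]
    have hne := insertBy_ne_nil (fun a b => decide ((a : Int × Int).1 < b.1)) x (h :: t)
    obtain ⟨h', t', heq⟩ : ∃ h' t', PySem.List.insertBy
        (fun a b => decide ((a : Int × Int).1 < b.1)) x (h :: t) = h' :: t' := by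
      cases hlist : PySem.List.insertBy (fun a b => decide ((a : Int × Int).1 < b.1)) x (h :: t) with
      | nil => exact absurd hlist hne
      | cons a b => exact ⟨a, b, rfl⟩
    have hh : h' = if x.1 < h.1 then x else h := by
      have := head?_insertBy x h t
      rw [heq] at this; simpa using this
    rw [heq, ih h' t', hh]

-- head of the stable sort equals A's fold over the tail
theorem head?_sorted (h : Int × Int) (t : List (Int × Int)) :
    (PySem.List.sorted (h :: t) (fun p => p.1) false).head?
      = some (t.foldl (fun m p => if m.1 > p.1 then p else m) h) := by
  rw [PySem.List.sorted_eq_foldl_insertBy]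
  simpa [PySem.List.insertBy] using head?_foldl_insertBy t h []

-- the extra comparison of the head against itself in A's loop is a no-op
theorem foldl_self_step (h : Int × Int) (t : List (Int × Int)) :
    (h :: t).foldl (fun m p => if m.1 > p.1 then p else m) h
      = t.foldl (fun m p => if m.1 > p.1 then p else m) h := by
  simp

-- ===== VERDICT (by name: the statement is the Claim_ definition above) =====
theorem tuple_bear_spec : Claim_equal_tuple_bear := by
  intro item _ hpre
  unfold Spec_tuple_bear
  cases item with
  | nil => exact absurd rfl hpre
  | cons h t =>
    unfold tuple_bear tuple_bear_alt
    have hs := head?_sorted h t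
    cases hsort : PySem.List.sorted (h :: t) (fun p => p.1) false with
    | nil => rw [hsort] at hs; simp at hs
    | cons m r =>
      rw [hsort] at hs
      simp only [List.head?] at hs
      have hm : m = t.foldl (fun m p => if m.1 > p.1 then p else m) h := by
        injection hs
      simp only [foldl_self_step, hm]
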